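-- pv_equiv track=rewrite | github.com/os-climate/sostrades-webapi | sos_trades_api/tools/visualisation/interface_diagram.py | get_base_namespace
-- ===== SOURCE A (Python) =====
-- def get_base_namespace(namespace: str, base_namespace_list: list) -> str:
--     node_base_namespace = ""
--     for base_ns in base_namespace_list:
--         if base_ns == namespace:
--             return base_ns
--         if base_ns in namespace and len(base_ns) > len(node_base_namespace):
--             node_base_namespace = base_ns
--     return node_base_namespace
-- ===== SOURCE B (Python) =====
-- def get_base_namespace(namespace: str, base_namespace_list: list) -> str:
--     for base_ns in sorted(base_namespace_list, key=len, reverse=True):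
--         if base_ns in namespace:
--             return base_ns
--     return ""
-- ===== Notes on version B (the rewrite author's own statement) =====
-- stated objective: alternative
-- what changed: Replaces A's running best-so-far accumulator with early exact-match return by a stable length-descending sort followed by a scan that returns the first substring candidate (the exact-match shortcut is subsumed, since an exact match is the unique maximal-length substring); the scan stops at the first hit, whereas A substring-tests every element.
import Mathlib
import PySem

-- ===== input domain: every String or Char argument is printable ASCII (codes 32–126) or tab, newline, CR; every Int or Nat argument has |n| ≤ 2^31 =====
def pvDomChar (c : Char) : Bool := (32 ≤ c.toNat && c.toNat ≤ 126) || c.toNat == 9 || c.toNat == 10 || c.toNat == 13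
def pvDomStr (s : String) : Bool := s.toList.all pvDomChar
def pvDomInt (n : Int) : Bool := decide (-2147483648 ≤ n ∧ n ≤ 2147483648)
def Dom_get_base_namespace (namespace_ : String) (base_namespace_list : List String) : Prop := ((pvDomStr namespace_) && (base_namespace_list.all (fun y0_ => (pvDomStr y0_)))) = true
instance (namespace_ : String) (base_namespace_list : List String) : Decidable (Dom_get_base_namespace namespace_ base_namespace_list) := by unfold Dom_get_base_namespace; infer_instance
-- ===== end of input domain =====

-- B replaces A's best-so-far accumulator (with early exact-match return) by a stable
-- length-descending sort followed by a first-substring scan; same return value, different decomposition.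

-- ===== PORT A =====
-- the loop of A: accumulator node_base_namespace, early return on exact match
def pvGoA (namespace_ : String) (acc : String) : List String → String
  | [] => acc
  | base_ns :: rest =>
    if base_ns = namespace_ then base_ns
    else if PySem.Str.isIn base_ns namespace_ = true ∧ PySem.Str.len acc < PySem.Str.len base_ns then
      pvGoA namespace_ base_ns rest
    else
      pvGoA namespace_ acc rest

def get_base_namespace (namespace_ : String) (base_namespace_list : List String) : String :=
  pvGoA namespace_ "" base_namespace_list

-- ===== PORT B =====
-- the loop of B: return the first substring candidate, else ""
def pvFindSub (namespace_ : String) : List String → String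
  | [] => ""
  | base_ns :: rest =>
    if PySem.Str.isIn base_ns namespace_ = true then base_ns else pvFindSub namespace_ rest

def get_base_namespace_alt (namespace_ : String) (base_namespace_list : List String) : String :=
  pvFindSub namespace_ (PySem.List.sorted base_namespace_list (fun s => PySem.Str.len s) true)

-- ===== PRECONDITION & SPEC =====
def Spec_get_base_namespace (namespace_ : String) (base_namespace_list : List String) (out : String) : Prop := out = get_base_namespace_alt namespace_ base_namespace_list
instance (namespace_ : String) (base_namespace_list : List String) (out : String) : Decidable (Spec_get_base_namespace namespace_ base_namespace_list out) := by unfold Spec_get_base_namespace; infer_instance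

-- ===== CLAIM (what is proved, stated in full; the proofs are below) =====
def Claim_equal_get_base_namespace : Prop := ∀ (namespace_ : String) (base_namespace_list : List String), Dom_get_base_namespace namespace_ base_namespace_list → Spec_get_base_namespace namespace_ base_namespace_list (get_base_namespace namespace_ base_namespace_list)

-- ===== LEMMAS AND PROOFS =====

-- the pure accumulator step of A's loop (no early return)
def pvStep (namespace_ a x : String) : String :=
  if PySem.Str.isIn x namespace_ = true ∧ PySem.Str.len a < PySem.Str.len x then x else a

-- the insertion predicate of PySem's stable reverse sort by length
def pvBr (x y : String) : Bool := decide (PySem.Str.len y < PySem.Str.len x)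

-- once the accumulator is as long as namespace_, A's fold never changes it
theorem pvFold_fixed (namespace_ : String) (rest : List String) (a : String)
    (h : namespace_.toList.length ≤ a.toList.length) :
    rest.foldl (pvStep namespace_) a = a := by
  induction rest with
  | nil => rfl
  | cons x t ih =>
    have hx : pvStep namespace_ a x = a := by
      unfold pvStep
      split_ifs with hc
      · exfalso
        obtain ⟨hin, hlt⟩ := hc
        have hinf := (PySem.Str.isIn_iff_infix x namespace_).mp hin
        have := hinf.length_le
        simp only [PySem.Str.len_eq] at hlt
        omega
      · rfl
    rw [List.foldl_cons, hx, ih]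

-- A's loop equals the pure fold whenever the accumulator is a substring of namespace_
theorem pvGoA_eq_foldl (namespace_ : String) (lst : List String) :
    ∀ acc : String, acc.toList <:+: namespace_.toList →
      pvGoA namespace_ acc lst = lst.foldl (pvStep namespace_) acc := by
  induction lst with
  | nil => intro acc _; rfl
  | cons b rest ih =>
    intro acc hacc
    rw [List.foldl_cons]
    by_cases hb : b = namespace_
    · subst hb
      have hin : PySem.Str.isIn b b = true := (PySem.Str.isIn_iff_infix b b).mpr (List.infix_refl _)
      have hle : acc.toList.length ≤ b.toList.length := hacc.length_le
      rw [pvGoA, if_pos rfl]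
      by_cases hlt : PySem.Str.len acc < PySem.Str.len b
      · have hstep : pvStep b acc b = b := by
          unfold pvStep; rw [if_pos ⟨hin, hlt⟩]
        rw [hstep, pvFold_fixed b rest b le_rfl]
      · simp only [PySem.Str.len_eq, not_lt] at hlt
        have hlen : acc.toList.length = b.toList.length := by omega
        have : acc = b := String.toList_inj.mp (hacc.eq_of_length hlen)
        subst this
        have hstep : pvStep acc acc acc = acc := by
          unfold pvStep; split_ifs <;> rfl
        rw [hstep, pvFold_fixed acc rest acc le_rfl]
    · rw [pvGoA, if_neg hb]
      by_cases hc : PySem.Str.isIn b namespace_ = true ∧ PySem.Str.len acc < PySem.Str.len b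
      · have hstep : pvStep namespace_ acc b = b := by unfold pvStep; rw [if_pos hc]
        rw [if_pos hc, hstep]
        exact ih b ((PySem.Str.isIn_iff_infix b namespace_).mp hc.1)
      · have hstep : pvStep namespace_ acc b = acc := by unfold pvStep; rw [if_neg hc]
        rw [if_neg hc, hstep]
        exact ih acc hacc

-- B's scan returns "" or a member of the list
theorem pvFindSub_mem (namespace_ : String) (ys : List String) :
    pvFindSub namespace_ ys = "" ∨ pvFindSub namespace_ ys ∈ ys := by
  induction ys with
  | nil => left; rfl
  | cons y t ih =>
    rw [pvFindSub]
    split_ifs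
    · right; exact List.mem_cons_self
    · rcases ih with h | h
      · left; exact h
      · right; exact List.mem_cons_of_mem _ h

-- scanning after a stable descending insertion = one accumulator step of A
theorem pvFindSub_insertBy (namespace_ x : String) (ys : List String)
    (hys : ys.Pairwise (fun a b => PySem.Str.len b ≤ PySem.Str.len a)) :
    pvFindSub namespace_ (PySem.List.insertBy pvBr x ys) =
      pvStep namespace_ (pvFindSub namespace_ ys) x := by
  induction ys with
  | nil =>
    show pvFindSub namespace_ [x] = pvStep namespace_ "" x
    rw [pvFindSub, pvStep]
    by_cases hx : PySem.Str.isIn x namespace_ = true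
    · rw [if_pos hx]
      by_cases hlt : PySem.Str.len "" < PySem.Str.len x
      · rw [if_pos ⟨hx, hlt⟩]
      · rw [if_neg (by tauto)]
        simp only [PySem.Str.len_eq, not_lt] at hlt
        have h0 : ("" : String).toList.length = 0 := rfl
        have : x.toList.length = 0 := by omega
        exact (String.toList_inj.mp (by simpa [List.length_eq_zero_iff] using this)).symm
    · rw [if_neg hx, if_neg (by tauto)]; rfl
  | cons y t ih =>
    rw [List.pairwise_cons] at hys
    obtain ⟨hy, ht⟩ := hys
    show pvFindSub namespace_ (if pvBr x y = true then x :: y :: t else y :: PySem.List.insertBy pvBr x t)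
        = pvStep namespace_ (pvFindSub namespace_ (y :: t)) x
    by_cases hbr : pvBr x y = true
    · rw [if_pos hbr, pvFindSub]
      have hylt : PySem.Str.len y < PySem.Str.len x := by
        have := of_decide_eq_true hbr; exact this
      by_cases hx : PySem.Str.isIn x namespace_ = true
      · rw [if_pos hx]
        have hFlt : PySem.Str.len (pvFindSub namespace_ (y :: t)) < PySem.Str.len x := by
          rcases pvFindSub_mem namespace_ (y :: t) with h | h
          · rw [h]
            simp only [PySem.Str.len_eq] at hylt ⊢
            have : (0 : Int) ≤ (y.toList.length : Int) := by positivity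
            simp only [show ("" : String).toList = [] from rfl, List.length_nil]
            omega
          · rcases List.mem_cons.mp h with h | h
            · rw [h]; exact hylt
            · exact lt_of_le_of_lt (hy _ h) hylt
        rw [pvStep, if_pos ⟨hx, hFlt⟩]
      · rw [if_neg hx, pvStep, if_neg (by tauto)]
    · rw [if_neg hbr]
      have hxy : PySem.Str.len x ≤ PySem.Str.len y := by
        simp only [pvBr, decide_eq_true_eq] at hbr
        omega
      rw [pvFindSub, pvFindSub]
      by_cases hpy : PySem.Str.isIn y namespace_ = true
      · rw [if_pos hpy, if_pos hpy, pvStep, if_neg (by rintro ⟨_, h⟩; omega)]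
      · rw [if_neg hpy, if_neg hpy, ih ht]

-- B on the sorted list = A's pure fold, by right-to-left induction over the input
theorem pvB_eq_foldl (namespace_ : String) (lst : List String) :
    get_base_namespace_alt namespace_ lst = lst.foldl (pvStep namespace_) "" := by
  induction lst using List.reverseRecOn with
  | nil => rfl
  | append_singleton l x ih =>
    have hsort : PySem.List.sorted (l ++ [x]) (fun s => PySem.Str.len s) true
        = PySem.List.insertBy pvBr x (PySem.List.sorted l (fun s => PySem.Str.len s) true) := by
      rw [PySem.List.sorted_rev_eq_foldl_insertBy, PySem.List.sorted_rev_eq_foldl_insertBy,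
        List.foldl_append]
      rfl
    rw [get_base_namespace_alt, hsort, List.foldl_append, List.foldl_cons, List.foldl_nil,
      pvFindSub_insertBy namespace_ x _ (PySem.List.sorted_pairwise_rev l (fun s => PySem.Str.len s)),
      ← get_base_namespace_alt, ih]

-- ===== VERDICT (by name: the statement is the Claim_ definition above) =====
theorem get_base_namespace_spec : Claim_equal_get_base_namespace := by
  intro namespace_ lst _
  unfold Spec_get_base_namespace get_base_namespace
  rw [pvGoA_eq_foldl namespace_ lst "" (by simp), pvB_eq_foldl]
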